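-- pv_equiv track=rewrite | github.com/elbek-hacker/phyton_darslari | ImtihonMasalalar/2-day/DasturlashAsoslari/Funksiya/misol9.py | yigindi
-- ===== SOURCE A (Python) =====
-- def yigindi(son):
--     lst = []
--     count = 0
--     yig = 0
--     while son != 0:
--         count += 1
--         yig += son%10
--         son //= 10
--         if count == 2:
--             lst.append(str(yig))
--             count = 0
--             yig = 0
--     if count == 1:
--         lst.append(str(yig))
--
--     lst.reverse()
--     return ' '.join(lst)
-- ===== SOURCE B (Python) =====
-- def yigindi(son):
--     # two-pass: extract all digits first, then sum consecutive pairs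
--     digits = []
--     while son != 0:
--         digits.append(son % 10)
--         son //= 10
--     sums = []
--     while digits:
--         sums.append(str(sum(digits[:2])))
--         digits = digits[2:]
--     sums.reverse()
--     return ' '.join(sums)
-- ===== Notes on version B (the rewrite author's own statement) =====
-- stated objective: alternative
-- what changed: Replaces A's single fused loop with a count/yig accumulator state machine by two passes: first extract the full digit list, then consume it two digits at a time summing each pair.
import Mathlib
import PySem

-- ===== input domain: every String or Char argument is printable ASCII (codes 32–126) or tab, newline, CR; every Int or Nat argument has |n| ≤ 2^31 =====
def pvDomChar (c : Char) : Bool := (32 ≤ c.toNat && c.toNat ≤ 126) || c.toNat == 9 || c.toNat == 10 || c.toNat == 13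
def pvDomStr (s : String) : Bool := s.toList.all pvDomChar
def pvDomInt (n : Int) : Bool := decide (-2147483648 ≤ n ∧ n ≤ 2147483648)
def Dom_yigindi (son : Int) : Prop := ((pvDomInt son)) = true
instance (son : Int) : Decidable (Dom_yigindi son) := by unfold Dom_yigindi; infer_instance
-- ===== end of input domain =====

-- B is an alternative of the same cost: two passes (digit extraction, then pair summation)
-- instead of A's fused loop with a count/yig state machine. For son < 0 the Python
-- loops of A and B both diverge; both ports' guards return '' there, so port equality is total.

-- termination measure fact used by both ports' loops
theorem pvFloordiv10_toNat_lt (son : Int) (h : ¬ son ≤ 0) :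
    (PySem.Int.floordiv son 10).toNat < son.toNat := by
  rw [PySem.Int.floordiv_eq_ediv_of_pos (by omega : (0:Int) < 10)]
  omega

-- ===== PORT A =====
-- while son != 0: count += 1; yig += son%10; son //= 10; if count == 2: append; reset
-- (the 'son ≤ 0' guard makes the port total; Python's loop diverges for son < 0, where Python diverges nothing is claimed)
def yigindiLoop (son : Int) (lst : List String) (count yig : Int) : List String × Int × Int :=
  if _h : son ≤ 0 then (lst, count, yig)
  else
    let count' := count + 1
    let yig' := yig + PySem.Int.mod son 10
    let son' := PySem.Int.floordiv son 10
    if count' = 2 then yigindiLoop son' (lst ++ [PySem.Int.toStr yig']) 0 0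
    else yigindiLoop son' lst count' yig'
termination_by son.toNat
decreasing_by all_goals exact pvFloordiv10_toNat_lt son _h

def yigindi (son : Int) : String :=
  let r := yigindiLoop son [] 0 0
  let lst := if r.2.1 = 1 then r.1 ++ [PySem.Int.toStr r.2.2] else r.1
  PySem.Str.join " " lst.reverse

-- ===== PORT B =====
-- pass 1: while son != 0: digits.append(son % 10); son //= 10
def digitsLoop (son : Int) (acc : List Int) : List Int :=
  if _h : son ≤ 0 then acc
  else digitsLoop (PySem.Int.floordiv son 10) (acc ++ [PySem.Int.mod son 10])
termination_by son.toNat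
decreasing_by exact pvFloordiv10_toNat_lt son _h

-- pass 2: while digits: sums.append(str(sum(digits[:2]))); digits = digits[2:]
def pairLoop (digits : List Int) (sums : List String) : List String :=
  if _h : digits = [] then sums
  else pairLoop (PySem.List.slice digits (some 2) none)
                (sums ++ [PySem.Int.toStr (PySem.List.slice digits none (some 2)).sum])
termination_by digits.length
decreasing_by
  rw [PySem.List.slice_from digits (by omega : (0:Int) ≤ 2)]
  cases digits with
  | nil => simp_all
  | cons a t => simp

def yigindi_alt (son : Int) : String :=
  let sums := pairLoop (digitsLoop son []) []
  PySem.Str.join " " sums.reverse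

-- ===== PRECONDITION & SPEC =====
def Spec_yigindi (son : Int) (out : String) : Prop := out = yigindi_alt son
instance (son : Int) (out : String) : Decidable (Spec_yigindi son out) := by unfold Spec_yigindi; infer_instance

-- ===== CLAIM =====
def Claim_equal_yigindi : Prop := ∀ (son : Int), Dom_yigindi son → Spec_yigindi son (yigindi son)

-- ===== LEMMAS AND PROOFS =====

-- single-step characterisations of A's loop
theorem yigindiLoop_stop {son : Int} (h : son ≤ 0) (lst : List String) (c y : Int) :
    yigindiLoop son lst c y = (lst, c, y) := by
  rw [yigindiLoop]; simp [h]

theorem yigindiLoop_step0 {son : Int} (h : ¬ son ≤ 0) (lst : List String) :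
    yigindiLoop son lst 0 0
      = yigindiLoop (PySem.Int.floordiv son 10) lst 1 (PySem.Int.mod son 10) := by
  rw [yigindiLoop]; norm_num [h]

theorem yigindiLoop_step1 {son : Int} (h : ¬ son ≤ 0) (lst : List String) (y : Int) :
    yigindiLoop son lst 1 y
      = yigindiLoop (PySem.Int.floordiv son 10)
          (lst ++ [PySem.Int.toStr (y + PySem.Int.mod son 10)]) 0 0 := by
  rw [yigindiLoop]; norm_num [h]

-- single-step characterisations of B's two passes
theorem digitsLoop_stop {son : Int} (h : son ≤ 0) (acc : List Int) :
    digitsLoop son acc = acc := by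
  rw [digitsLoop]; simp [h]

theorem digitsLoop_step {son : Int} (h : ¬ son ≤ 0) (acc : List Int) :
    digitsLoop son acc
      = digitsLoop (PySem.Int.floordiv son 10) (acc ++ [PySem.Int.mod son 10]) := by
  rw [digitsLoop]; simp [h]

theorem digitsLoop_acc (n : Nat) : ∀ (son : Int), son.toNat = n → ∀ (acc : List Int),
    digitsLoop son acc = acc ++ digitsLoop son [] := by
  induction n using Nat.strong_induction_on with
  | _ n ih =>
    intro son hn acc
    by_cases h : son ≤ 0
    · rw [digitsLoop_stop h, digitsLoop_stop h]; simp
    · rw [digitsLoop_step h, digitsLoop_step h]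
      have hlt := pvFloordiv10_toNat_lt son h
      rw [ih _ (hn ▸ hlt) _ rfl (acc ++ [PySem.Int.mod son 10]),
          ih _ (hn ▸ hlt) _ rfl ([] ++ [PySem.Int.mod son 10])]
      simp

theorem pairLoop_nil (sums : List String) : pairLoop [] sums = sums := by
  rw [pairLoop]; simp

theorem pairLoop_two (a b : Int) (t : List Int) (sums : List String) :
    pairLoop (a :: b :: t) sums = pairLoop t (sums ++ [PySem.Int.toStr (a + b)]) := by
  rw [pairLoop]
  rw [PySem.List.slice_from _ (by omega : (0:Int) ≤ 2),
      PySem.List.slice_to _ (by omega : (0:Int) ≤ 2)]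
  simp

theorem pairLoop_one (a : Int) (sums : List String) :
    pairLoop [a] sums = sums ++ [PySem.Int.toStr a] := by
  rw [pairLoop]
  rw [PySem.List.slice_from _ (by omega : (0:Int) ≤ 2),
      PySem.List.slice_to _ (by omega : (0:Int) ≤ 2)]
  simp [pairLoop_nil]

-- the key invariant: A's fused loop (plus its trailing count==1 append) equals
-- B's pairLoop applied to the digit list of son, for 0 ≤ son.
theorem key (n : Nat) : ∀ (son : Int), son.toNat = n → ∀ (lst : List String),
    (if (yigindiLoop son lst 0 0).2.1 = 1
       then (yigindiLoop son lst 0 0).1 ++ [PySem.Int.toStr (yigindiLoop son lst 0 0).2.2]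
       else (yigindiLoop son lst 0 0).1)
      = pairLoop (digitsLoop son []) lst := by
  induction n using Nat.strong_induction_on with
  | _ n ih =>
    intro son hn lst
    by_cases h0 : son ≤ 0
    · rw [yigindiLoop_stop h0, digitsLoop_stop h0, pairLoop_nil]
      simp
    · rw [yigindiLoop_step0 h0, digitsLoop_step h0,
          digitsLoop_acc (PySem.Int.floordiv son 10).toNat _ rfl]
      simp only [List.nil_append]
      by_cases h1 : PySem.Int.floordiv son 10 ≤ 0
      · rw [yigindiLoop_stop h1, digitsLoop_stop h1]
        simp only [List.append_nil]
        rw [pairLoop_one]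
        simp
      · rw [yigindiLoop_step1 h1, digitsLoop_step h1,
            digitsLoop_acc (PySem.Int.floordiv (PySem.Int.floordiv son 10) 10).toNat _ rfl]
        simp only [List.nil_append, List.cons_append]
        rw [pairLoop_two]
        have hlt : (PySem.Int.floordiv (PySem.Int.floordiv son 10) 10).toNat < n := by
          have a1 := pvFloordiv10_toNat_lt son h0
          have a2 := pvFloordiv10_toNat_lt (PySem.Int.floordiv son 10) h1
          omega
        exact ih _ hlt _ rfl _

-- ===== VERDICT =====
theorem yigindi_spec : Claim_equal_yigindi := by
  intro son _
  show PySem.Str.join " "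
      ((if (yigindiLoop son [] 0 0).2.1 = 1
          then (yigindiLoop son [] 0 0).1 ++ [PySem.Int.toStr (yigindiLoop son [] 0 0).2.2]
          else (yigindiLoop son [] 0 0).1).reverse)
      = PySem.Str.join " " ((pairLoop (digitsLoop son []) []).reverse)
  rw [key son.toNat son rfl []]
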